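-- pv_equiv track=rewrite | github.com/MatejRojec/Uravnotezen-rdece-modri-povezan-podgraf | algoritem.py | j_vzorca
-- ===== SOURCE A (Python) =====
-- def j_vzorca(mreza, vzorec, stolpec):
--     j = 0
--     for item in mreza:
--         if item[0] == stolpec:
--             for v in vzorec:
--                 if item[1] == (v-1):
--                     j = j+item[2]
--     return j
-- ===== SOURCE B (Python) =====
-- def j_vzorca(mreza, vzorec, stolpec):
--     table = {}
--     for a, b, c in mreza:
--         if a == stolpec:
--             table[b] = table.get(b, 0) + c
--     total = 0
--     for v in vzorec:
--         total += table.get(v - 1, 0)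
--     return total
-- ===== Notes on version B (the rewrite author's own statement) =====
-- stated objective: alternative
-- what changed: Replaced the nested loop over mreza x vzorec by two sequential passes: one over mreza building a column-filtered weight table keyed by row index, then one over vzorec summing table lookups.
import Mathlib
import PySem

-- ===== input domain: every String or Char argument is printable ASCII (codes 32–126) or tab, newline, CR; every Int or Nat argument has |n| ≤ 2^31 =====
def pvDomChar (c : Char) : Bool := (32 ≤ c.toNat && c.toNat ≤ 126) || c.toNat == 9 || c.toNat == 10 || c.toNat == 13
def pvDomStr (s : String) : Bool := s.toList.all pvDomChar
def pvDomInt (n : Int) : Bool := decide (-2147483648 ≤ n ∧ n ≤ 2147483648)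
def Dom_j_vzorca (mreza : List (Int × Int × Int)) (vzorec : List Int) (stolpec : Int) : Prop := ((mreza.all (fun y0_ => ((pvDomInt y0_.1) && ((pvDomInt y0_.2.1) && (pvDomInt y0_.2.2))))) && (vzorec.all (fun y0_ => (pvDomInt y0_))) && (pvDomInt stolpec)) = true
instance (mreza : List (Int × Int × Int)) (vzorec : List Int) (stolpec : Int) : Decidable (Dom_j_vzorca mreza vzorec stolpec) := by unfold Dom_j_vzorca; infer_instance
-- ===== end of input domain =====

-- B replaces A's nested loop by two sequential passes: a weight table keyed by row
-- index built from mreza, then lookups for each v in vzorec (objective: alternative).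

-- ===== PORT A =====
def j_vzorca (mreza : List (Int × Int × Int)) (vzorec : List Int) (stolpec : Int) : Int :=
  mreza.foldl (fun j item =>
    if item.1 = stolpec then
      vzorec.foldl (fun j v => if item.2.1 = v - 1 then j + item.2.2 else j) j
    else j) 0

-- ===== PORT B =====
def j_vzorca_alt (mreza : List (Int × Int × Int)) (vzorec : List Int) (stolpec : Int) : Int :=
  let table : PySem.Dict Int Int :=
    mreza.foldl (fun t item =>
      if item.1 = stolpec then t.insert item.2.1 (t.getD item.2.1 0 + item.2.2) else t)
      PySem.Dict.empty
  vzorec.foldl (fun total v => total + table.getD (v - 1) 0) 0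

-- ===== PRECONDITION & SPEC =====
def Spec_j_vzorca (mreza : List (Int × Int × Int)) (vzorec : List Int) (stolpec : Int) (out : Int) : Prop := out = j_vzorca_alt mreza vzorec stolpec
instance (mreza : List (Int × Int × Int)) (vzorec : List Int) (stolpec : Int) (out : Int) : Decidable (Spec_j_vzorca mreza vzorec stolpec out) := by unfold Spec_j_vzorca; infer_instance

-- ===== CLAIM (what is proved, stated in full; the proofs are below) =====
def Claim_equal_j_vzorca : Prop := ∀ (mreza : List (Int × Int × Int)) (vzorec : List Int) (stolpec : Int), Dom_j_vzorca mreza vzorec stolpec → Spec_j_vzorca mreza vzorec stolpec (j_vzorca mreza vzorec stolpec)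

-- ===== LEMMAS AND PROOFS =====

/-- Total weight, among entries of `m` in column `s`, at row index `q`. -/
def wsum (m : List (Int × Int × Int)) (s q : Int) : Int :=
  (m.map (fun item => if item.1 = s ∧ item.2.1 = q then item.2.2 else 0)).sum

theorem sum_map_add {α : Type} (l : List α) (f g : α → Int) :
    (l.map (fun x => f x + g x)).sum = (l.map f).sum + (l.map g).sum := by
  induction l with
  | nil => simp
  | cons x xs ih => simp [ih]; ring

/-- The table built by B's first loop holds the column-filtered weight sums. -/
theorem table_getD (m : List (Int × Int × Int)) (s q : Int) (d : PySem.Dict Int Int) :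
    (m.foldl (fun t item =>
        if item.1 = s then t.insert item.2.1 (t.getD item.2.1 0 + item.2.2) else t) d).getD q 0
      = d.getD q 0 + wsum m s q := by
  induction m generalizing d with
  | nil => simp [wsum]
  | cons i rest ih =>
    simp only [List.foldl_cons, wsum, List.map_cons, List.sum_cons]
    by_cases hc : i.1 = s
    · rw [if_pos hc, ih]
      by_cases hq : i.2.1 = q
      · subst hq
        rw [PySem.Dict.getD_insert]
        simp [hc, wsum]
        ring
      · rw [PySem.Dict.getD_insert]
        have : ¬ (q = i.2.1) := fun h => hq h.symm
        simp [this, hq, hc, wsum]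
    · rw [if_neg hc, ih]
      simp [hc, wsum]

/-- A's inner loop adds `w` once per matching `v`. -/
theorem inner_foldl (vz : List Int) (q w j0 : Int) :
    vz.foldl (fun j v => if q = v - 1 then j + w else j) j0
      = j0 + (vz.map (fun v => if q = v - 1 then w else 0)).sum := by
  induction vz generalizing j0 with
  | nil => simp
  | cons v vs ih =>
    simp only [List.foldl_cons, List.map_cons, List.sum_cons, ih]
    split_ifs <;> ring

/-- Exchanging the two summations. -/
theorem swap_sums (m : List (Int × Int × Int)) (vz : List Int) (s : Int) :
    (m.map (fun item => if item.1 = s then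
        (vz.map (fun v => if item.2.1 = v - 1 then item.2.2 else 0)).sum else 0)).sum
      = (vz.map (fun v => wsum m s (v - 1))).sum := by
  induction m with
  | nil => simp [wsum]
  | cons i rest ih =>
    simp only [List.map_cons, List.sum_cons, ih]
    have hsplit : (vz.map (fun v => wsum (i :: rest) s (v - 1))).sum
        = (vz.map (fun v => if i.1 = s ∧ i.2.1 = v - 1 then i.2.2 else 0)).sum
          + (vz.map (fun v => wsum rest s (v - 1))).sum := by
      rw [← sum_map_add]
      apply congrArg
      apply List.map_congr_left
      intro v _
      simp [wsum]
    rw [hsplit]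
    by_cases hc : i.1 = s
    · simp only [if_pos hc]
      congr 2
      apply List.map_congr_left
      intro v _
      simp [hc]
    · simp only [if_neg hc]
      have : (vz.map (fun v => if i.1 = s ∧ i.2.1 = v - 1 then i.2.2 else 0)).sum = 0 := by
        have : (vz.map (fun v => if i.1 = s ∧ i.2.1 = v - 1 then i.2.2 else 0))
            = vz.map (fun _ => 0) := by
          apply List.map_congr_left
          intro v _
          simp [hc]
        simp [this]
      omega

/-- A's nested loops compute, per `v`, the weight sum at row `v - 1`. -/
theorem portA_eq_sum (m : List (Int × Int × Int)) (vz : List Int) (s : Int) :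
    j_vzorca m vz s = (vz.map (fun v => wsum m s (v - 1))).sum := by
  unfold j_vzorca
  have hfun : (fun (j : Int) (item : Int × Int × Int) =>
      if item.1 = s then
        vz.foldl (fun j v => if item.2.1 = v - 1 then j + item.2.2 else j) j
      else j)
      = fun j item => j + (if item.1 = s then
        (vz.map (fun v => if item.2.1 = v - 1 then item.2.2 else 0)).sum else 0) := by
    funext j item
    by_cases hc : item.1 = s
    · simp only [if_pos hc, inner_foldl]
    · simp [hc]
  rw [hfun, PySem.List.foldl_add, zero_add, swap_sums]

-- ===== VERDICT (by name: the statement is the Claim_ definition above) =====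
theorem j_vzorca_spec : Claim_equal_j_vzorca := by
  intro mreza vzorec stolpec _
  unfold Spec_j_vzorca
  simp only [j_vzorca_alt]
  rw [portA_eq_sum, PySem.List.foldl_add, zero_add]
  apply congrArg
  apply List.map_congr_left
  intro v _
  rw [table_getD]
  simp
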